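-- pv_equiv track=rewrite | github.com/jbkinney/poolparty-statetracker | statecounter/src/statecounter/ops/split_op.py | _compute_equal_sizes
-- ===== SOURCE A (Python) =====
-- def _compute_equal_sizes(num_states, num_parts):
--     """Compute sizes for equal splitting."""
--     if num_states < num_parts:
--         raise ValueError(
--             f"Cannot split {num_states} states into {num_parts} parts "
--             f"(each part must have at least 1 state)"
--         )
--     base_size = num_states // num_parts
--     remainder = num_states % num_parts
--     sizes = []
--     for i in range(num_parts):
--         if i < remainder:
--             sizes.append(base_size + 1)
--         else:
--             sizes.append(base_size)
--     return sizes
-- ===== SOURCE B (Python) =====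
-- def _compute_equal_sizes(num_states, num_parts):
--     """Compute sizes for equal splitting."""
--     if num_states < num_parts:
--         raise ValueError(
--             f"Cannot split {num_states} states into {num_parts} parts "
--             f"(each part must have at least 1 state)"
--         )
--     sizes = []
--     remaining = num_states
--     for parts_left in range(num_parts, 0, -1):
--         size = -(-remaining // parts_left)  # ceil-divide what is left fairly
--         sizes.append(size)
--         remaining -= size
--     return sizes
-- ===== Notes on version B (the rewrite author's own statement) =====
-- stated objective: alternative
-- what changed: Replaces the global divmod-with-remainder-branch construction by a sequential fair-division loop: each step emits ceil(remaining/parts_left) and subtracts it, maintaining a shrinking remaining count instead of a precomputed remainder.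
import Mathlib
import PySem

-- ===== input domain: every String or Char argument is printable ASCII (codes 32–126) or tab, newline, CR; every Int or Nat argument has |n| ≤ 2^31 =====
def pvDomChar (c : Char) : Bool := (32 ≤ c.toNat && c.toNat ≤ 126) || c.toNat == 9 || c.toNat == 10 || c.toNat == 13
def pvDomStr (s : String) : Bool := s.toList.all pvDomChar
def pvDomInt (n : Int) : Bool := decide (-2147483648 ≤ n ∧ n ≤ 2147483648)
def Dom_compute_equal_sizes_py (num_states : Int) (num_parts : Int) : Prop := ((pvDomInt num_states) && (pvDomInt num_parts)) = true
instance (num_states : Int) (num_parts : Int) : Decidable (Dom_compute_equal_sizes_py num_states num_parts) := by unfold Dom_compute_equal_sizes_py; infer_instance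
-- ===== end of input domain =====

-- B replaces A's precomputed divmod + per-index branch by a sequential fair-division loop (ceil of remaining over parts left); alternative decomposition, same cost.


-- ===== PORT A =====
def compute_equal_sizes_py (num_states : Int) (num_parts : Int) : List Int :=
  let base_size := PySem.Int.floordiv num_states num_parts
  let remainder := PySem.Int.mod num_states num_parts
  (PySem.List.pyRange 0 num_parts 1).foldl
    (fun sizes i => if i < remainder then sizes ++ [base_size + 1] else sizes ++ [base_size]) []

-- ===== PORT B =====
def compute_equal_sizes_py_alt (num_states : Int) (num_parts : Int) : List Int :=
  ((PySem.List.pyRange num_parts 0 (-1)).foldl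
    (fun (st : List Int × Int) parts_left =>
      let size := -(PySem.Int.floordiv (-st.2) parts_left)
      (st.1 ++ [size], st.2 - size)) ([], num_states)).1

-- ===== PRECONDITION & SPEC =====
-- Pre_ excludes exactly where A raises: num_states < num_parts (ValueError) and num_parts = 0 (ZeroDivisionError).
def Pre_compute_equal_sizes_py (num_states : Int) (num_parts : Int) : Prop :=
  num_parts ≤ num_states ∧ num_parts ≠ 0
instance (num_states : Int) (num_parts : Int) : Decidable (Pre_compute_equal_sizes_py num_states num_parts) := by unfold Pre_compute_equal_sizes_py; infer_instance
def pvWitness_compute_equal_sizes_py : Int × Int := (7, 3)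


def Spec_compute_equal_sizes_py (num_states : Int) (num_parts : Int) (out : List Int) : Prop := out = compute_equal_sizes_py_alt num_states num_parts
instance (num_states : Int) (num_parts : Int) (out : List Int) : Decidable (Spec_compute_equal_sizes_py num_states num_parts out) := by unfold Spec_compute_equal_sizes_py; infer_instance

-- ===== CLAIM =====
def Claim_equal_compute_equal_sizes_py : Prop := ∀ (num_states : Int) (num_parts : Int), Dom_compute_equal_sizes_py num_states num_parts → Pre_compute_equal_sizes_py num_states num_parts → Spec_compute_equal_sizes_py num_states num_parts (compute_equal_sizes_py num_states num_parts)

-- ===== LEMMAS AND PROOFS =====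

-- A's loop over range(n) builds min(r,n) copies of q+1 followed by (n-r)⁺ copies of q.
theorem loop_eq_replicate (q r : Int) (n : Nat) :
    (PySem.List.pyRange 0 n 1).foldl
      (fun sizes i => if i < r then sizes ++ [q + 1] else sizes ++ [q]) [] =
    List.replicate (min r.toNat n) (q + 1) ++ List.replicate (n - r.toNat) q := by
  induction n with
  | zero => simp
  | succ n ih =>
    have hsplit : PySem.List.pyRange 0 ((n : Nat) + 1 : Nat) 1
        = PySem.List.pyRange 0 n 1 ++ [(n : Int)] := by
      have := PySem.List.pyRange_one_succ_right (a := 0) (b := (n : Int)) (by positivity)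
      push_cast
      exact this
    rw [hsplit, List.foldl_append, ih]
    by_cases h : (n : Int) < r
    · have h1 : min r.toNat n = n := by omega
      have h2 : min r.toNat (n + 1) = n + 1 := by omega
      have h3 : n - r.toNat = 0 := by omega
      have h4 : n + 1 - r.toNat = 0 := by omega
      simp [h, h1, h3, h4, List.replicate_succ']
    · have h1 : min r.toNat (n + 1) = min r.toNat n := by omega
      have h2 : n + 1 - r.toNat = (n - r.toNat) + 1 := by omega
      simp [h, h1, h2, List.replicate_succ', List.append_assoc]

-- B's fair-division loop with k+1 parts left, remaining m with m = q*(k+1)+r, 0 ≤ r ≤ k,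
-- appends r copies of q+1 then (k+1-r) copies of q.
theorem b_loop_eq_replicate (k : Nat) : ∀ (acc : List Int) (m q r : Int),
    q * ((k : Int) + 1) ≤ m → m < (q + 1) * ((k : Int) + 1) → r = m - q * ((k : Int) + 1) →
    ((PySem.List.pyRange ((k : Int) + 1) 0 (-1)).foldl
      (fun (st : List Int × Int) parts_left =>
        let size := -(PySem.Int.floordiv (-st.2) parts_left)
        (st.1 ++ [size], st.2 - size)) (acc, m)).1
    = acc ++ (List.replicate r.toNat (q + 1) ++ List.replicate (k + 1 - r.toNat) q) := by
  induction k with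
  | zero =>
    intro acc m q r h1 h2 h3
    have hq : q = m := by omega
    have hr : r = 0 := by omega
    rw [PySem.List.pyRange_neg_one_cons (by norm_num), PySem.List.pyRange_neg_one_eq_nil (by norm_num)]
    have hsz : -(PySem.Int.floordiv (-m) (0 + 1)) = m := by
      rw [PySem.Int.neg_floordiv_neg_eq_iff_of_pos (by norm_num)]
      constructor <;> omega
    simp [hq, hr]
  | succ k ih =>
    intro acc m q r h1 h2 h3
    have e1 : (q + 1) * ((k : Int) + 1 + 1) = q * ((k : Int) + 1 + 1) + ((k : Int) + 2) := by ring
    have e2 : q * ((k : Int) + 1) = q * ((k : Int) + 1 + 1) - q := by ring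
    have e3 : (q + 1) * ((k : Int) + 1) = q * ((k : Int) + 1 + 1) - q + (k : Int) + 1 := by ring
    rw [PySem.List.pyRange_neg_one_cons (by positivity)]
    push_cast at h1 h2 h3 ⊢
    by_cases hr : 0 < r
    · -- size = q + 1, carry remainder r - 1 into k+1 parts
      have hsz : -(PySem.Int.floordiv (-m) ((k : Int) + 1 + 1)) = q + 1 := by
        rw [PySem.Int.neg_floordiv_neg_eq_iff_of_pos (by positivity)]
        constructor <;> linarith
      have hstep : ((k : Int) + 1 + 1) - 1 = (k : Int) + 1 := by ring
      simp only [List.foldl_cons, hsz, hstep]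
      rw [ih (acc ++ [q + 1]) (m - (q + 1)) q (r - 1) (by linarith) (by linarith) (by linarith)]
      have hrn : r.toNat = (r - 1).toNat + 1 := by omega
      have hkn : k + 1 + 1 - ((r - 1).toNat + 1) = k + 1 - (r - 1).toNat := by omega
      rw [hrn, hkn, List.replicate_succ]
      simp [List.append_assoc]
    · -- r = 0: size = q, remainder stays 0
      have hr0 : r = 0 := by
        have : 0 ≤ r := by linarith
        omega
      have hsz : -(PySem.Int.floordiv (-m) ((k : Int) + 1 + 1)) = q := by
        rw [PySem.Int.neg_floordiv_neg_eq_iff_of_pos (by positivity)]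
        constructor <;> linarith
      have hstep : ((k : Int) + 1 + 1) - 1 = (k : Int) + 1 := by ring
      simp only [List.foldl_cons, hsz, hstep]
      rw [ih (acc ++ [q]) (m - q) q 0 (by linarith) (by linarith) (by linarith)]
      have h0 : r.toNat = 0 := by omega
      rw [h0]
      simp [List.replicate_succ, List.append_assoc]

-- ===== VERDICT =====
theorem compute_equal_sizes_py_spec : Claim_equal_compute_equal_sizes_py := by
  intro s p _ hpre
  obtain ⟨hle, hne⟩ := hpre
  unfold Spec_compute_equal_sizes_py compute_equal_sizes_py compute_equal_sizes_py_alt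
  rcases lt_trichotomy p 0 with hp | hp | hp
  · -- num_parts < 0: both loops run over empty ranges
    rw [PySem.List.pyRange_one_eq_nil (by omega), PySem.List.pyRange_neg_one_eq_nil (by omega)]
    simp
  · exact absurd hp hne
  · -- num_parts > 0
    set q := PySem.Int.floordiv s p with hq
    set r := PySem.Int.mod s p with hr
    have hr0 : 0 ≤ r := PySem.Int.mod_nonneg (a := s) hp
    have hrp : r < p := PySem.Int.mod_lt (a := s) hp
    have hqr : q * p + r = s := PySem.Int.floordiv_mul_add_mod s p
    obtain ⟨k, hk⟩ : ∃ k : Nat, p = (k : Int) + 1 := ⟨(p - 1).toNat, by omega⟩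
    subst hk
    have e1 : (q + 1) * ((k : Int) + 1) = q * ((k : Int) + 1) + ((k : Int) + 1) := by ring
    have hA : ((k : Int) + 1) = ((k + 1 : Nat) : Int) := by push_cast; ring
    rw [hA, loop_eq_replicate]
    rw [← hA, b_loop_eq_replicate k [] s q r (by linarith) (by linarith) (by linarith)]
    have h1 : min r.toNat (k + 1) = r.toNat := by omega
    rw [h1]
    simp
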